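-- pv_equiv track=rewrite | github.com/AestroFidelium/Gabriel | bot.py | _BuyItem
-- ===== SOURCE A (Python) =====
-- def _BuyItem(_Cost_,_CurGold_,_Count_):
--     """
--     Покупаем предмет
--
--         Вход :
--             _Cost_ = Стоимость предмета
--             _CurGold_ = Текущее количество золота, у игрока
--             _Count_ = Количество предметов, которых нужно купить
--         Выход :
--             Количество покупок
--             Сообщение в str форме. Разрез делать по (^)
--             Текущее количество золота.
--     """
--     CountBuy = 0
--     returnStr = ""
--     for target_list in range(int(_Count_)):
--         if _CurGold_ >= _Cost_:
--             CountBuy += 1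
--             _CurGold_ -= _Cost_
--         if target_list < 0:
--             returnStr += ("Количество не может быть меньше 1")
--     if _CurGold_ < _Cost_:
--         returnStr += ("У вас недостаточно золота. \nВсего количесто предметов : " + str(CountBuy))
--     else:
--         returnStr += ("Все предметы, были успешно куплены")
--     return CountBuy , returnStr , _CurGold_
-- ===== SOURCE B (Python) =====
-- def _BuyItem(_Cost_, _CurGold_, _Count_):
--     n = max(int(_Count_), 0)
--     if _CurGold_ < _Cost_:
--         bought = 0
--     elif _Cost_ <= 0:
--         bought = n
--     else:
--         bought = min(n, _CurGold_ // _Cost_)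
--     gold = _CurGold_ - bought * _Cost_
--     if gold < _Cost_:
--         msg = "У вас недостаточно золота. \nВсего количесто предметов : " + str(bought)
--     else:
--         msg = "Все предметы, были успешно куплены"
--     return bought, msg, gold
-- ===== Notes on version B (the rewrite author's own statement) =====
-- stated objective: faster
-- what changed: Replaced A's per-item purchase loop over range(Count) by a closed-form purchase count (0 if gold < cost, Count if cost <= 0, else min(Count, gold // cost)) with gold updated once by bought*cost.
import Mathlib
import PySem

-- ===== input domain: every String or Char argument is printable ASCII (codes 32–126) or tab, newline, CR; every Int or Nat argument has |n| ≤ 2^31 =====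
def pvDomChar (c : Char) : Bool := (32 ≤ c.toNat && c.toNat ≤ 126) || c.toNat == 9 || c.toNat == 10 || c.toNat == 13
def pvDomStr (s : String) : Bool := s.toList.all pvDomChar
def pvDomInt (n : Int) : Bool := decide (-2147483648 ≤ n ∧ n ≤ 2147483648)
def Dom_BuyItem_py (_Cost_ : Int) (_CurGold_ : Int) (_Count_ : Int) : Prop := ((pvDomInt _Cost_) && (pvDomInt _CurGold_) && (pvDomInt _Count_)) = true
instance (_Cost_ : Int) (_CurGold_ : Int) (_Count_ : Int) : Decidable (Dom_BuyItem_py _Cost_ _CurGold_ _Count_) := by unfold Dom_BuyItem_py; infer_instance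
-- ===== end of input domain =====

-- B replaces A's O(Count) buy-one-at-a-time loop by a closed-form count min(Count, Gold//Cost) — objective: faster (asymptotic).


-- ===== PORT A =====
-- literal port: fold over range(int(_Count_)) buying one item per iteration
def BuyItem_py (_Cost_ : Int) (_CurGold_ : Int) (_Count_ : Int) : Int × String × Int :=
  let st :=
    (PySem.List.pyRange 0 _Count_ 1).foldl
      (fun (st : Int × String × Int) target_list =>
        let st := if st.2.2 ≥ _Cost_ then (st.1 + 1, st.2.1, st.2.2 - _Cost_) else st
        if target_list < 0 then (st.1, st.2.1 ++ "Количество не может быть меньше 1", st.2.2)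
        else st)
      (0, "", _CurGold_)
  let returnStr :=
    if st.2.2 < _Cost_ then
      st.2.1 ++ ("У вас недостаточно золота. \nВсего количесто предметов : " ++ PySem.Int.toStr st.1)
    else st.2.1 ++ "Все предметы, были успешно куплены"
  (st.1, returnStr, st.2.2)

-- ===== PORT B =====
def BuyItem_py_alt (_Cost_ : Int) (_CurGold_ : Int) (_Count_ : Int) : Int × String × Int :=
  let n := max _Count_ 0
  let bought :=
    if _CurGold_ < _Cost_ then 0
    else if _Cost_ ≤ 0 then n
    else min n (PySem.Int.floordiv _CurGold_ _Cost_)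
  let gold := _CurGold_ - bought * _Cost_
  let msg :=
    if gold < _Cost_ then
      "У вас недостаточно золота. \nВсего количесто предметов : " ++ PySem.Int.toStr bought
    else "Все предметы, были успешно куплены"
  (bought, msg, gold)

-- ===== PRECONDITION & SPEC =====
def Spec_BuyItem_py (_Cost_ : Int) (_CurGold_ : Int) (_Count_ : Int) (out : Int × String × Int) : Prop := out = BuyItem_py_alt _Cost_ _CurGold_ _Count_
instance (_Cost_ : Int) (_CurGold_ : Int) (_Count_ : Int) (out : Int × String × Int) : Decidable (Spec_BuyItem_py _Cost_ _CurGold_ _Count_ out) := by unfold Spec_BuyItem_py; infer_instance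

-- ===== CLAIM (what is proved, stated in full; the proofs are below) =====
def Claim_equal_BuyItem_py : Prop := ∀ (_Cost_ : Int) (_CurGold_ : Int) (_Count_ : Int), Dom_BuyItem_py _Cost_ _CurGold_ _Count_ → Spec_BuyItem_py _Cost_ _CurGold_ _Count_ (BuyItem_py _Cost_ _CurGold_ _Count_)

-- ===== LEMMAS AND PROOFS =====

-- closed-form number of purchases after m loop iterations
def pvBuys (c g : Int) (m : Nat) : Int :=
  if g < c then 0 else if c ≤ 0 then (m : Int) else min (m : Int) (g / c)

-- the loop's step function (A's loop body)
def pvStep (c : Int) (st : Int × String × Int) (t : Int) : Int × String × Int :=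
  let st := if st.2.2 ≥ c then (st.1 + 1, st.2.1, st.2.2 - c) else st
  if t < 0 then (st.1, st.2.1 ++ "Количество не может быть меньше 1", st.2.2) else st

lemma pvBuys_zero (c g : Int) : pvBuys c g 0 = 0 := by
  unfold pvBuys
  split_ifs with h1 h2
  · rfl
  · rfl
  · have hq : 0 ≤ g / c := Int.ediv_nonneg (by omega) (by omega)
    simp [min_def]
    omega

lemma pvStep_eval (c b gold t : Int) (ht : ¬ t < 0) :
    pvStep c (b, "", gold) t =
      if gold ≥ c then (b + 1, "", gold - c) else (b, "", gold) := by
  simp only [pvStep, if_neg ht]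

lemma pvLoop (c g : Int) (m : Nat) :
    (PySem.List.pyRange 0 (m : Int) 1).foldl (pvStep c) (0, "", g)
      = (pvBuys c g m, "", g - pvBuys c g m * c) := by
  induction m with
  | zero =>
      simp [PySem.List.pyRange_one_eq_nil, pvBuys_zero]
  | succ m ih =>
      have hcast : ((m + 1 : Nat) : Int) = (m : Int) + 1 := by push_cast; ring
      rw [hcast, PySem.List.pyRange_one_succ_right (by omega), List.foldl_append, ih]
      simp only [List.foldl_cons, List.foldl_nil]
      rw [pvStep_eval c _ _ _ (by omega)]
      by_cases h1 : g < c
      · have hb : pvBuys c g m = 0 := by simp [pvBuys, h1]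
        have hb' : pvBuys c g (m + 1) = 0 := by simp [pvBuys, h1]
        rw [hb, hb', if_neg (by omega)]
      · by_cases h2 : c ≤ 0
        · have hb : pvBuys c g m = (m : Int) := by simp [pvBuys, h1, h2]
          have hb' : pvBuys c g (m + 1) = (m : Int) + 1 := by
            simp [pvBuys, h1, h2]
          have hmc : (m : Int) * c ≤ 0 := mul_nonpos_of_nonneg_of_nonpos (by omega) h2
          rw [hb, hb', if_pos (by omega)]
          simp only [Prod.mk.injEq]
          exact ⟨trivial, trivial, by ring⟩
        · -- c > 0 and g ≥ c
          have hc : 0 < c := by omega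
          set q := g / c with hq
          have hdm := Int.mul_ediv_add_emod g c
          have hr0 := Int.emod_nonneg g (by omega : c ≠ 0)
          have hrc := Int.emod_lt_of_pos g hc
          have hcq : c * q = q * c := mul_comm c q
          have hql : q * c ≤ g := by rw [← hq] at hdm; linarith
          have hqu : g < q * c + c := by rw [← hq] at hdm; linarith
          by_cases h3 : (m : Int) < q
          · have hb : pvBuys c g m = (m : Int) := by
              simp only [pvBuys, if_neg h1, if_neg h2, ← hq]
              exact min_eq_left (by omega)
            have hb' : pvBuys c g (m + 1) = (m : Int) + 1 := by
              simp only [pvBuys, if_neg h1, if_neg h2, ← hq]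
              rw [hcast]
              exact min_eq_left (by omega)
            have hle : ((m : Int) + 1) * c ≤ q * c :=
              mul_le_mul_of_nonneg_right (by omega) (by omega)
            have hexp : ((m : Int) + 1) * c = (m : Int) * c + c := by ring
            rw [hb, hb', if_pos (by linarith)]
            simp only [Prod.mk.injEq]
            exact ⟨trivial, trivial, by ring⟩
          · have hb : pvBuys c g m = q := by
              simp only [pvBuys, if_neg h1, if_neg h2, ← hq]
              exact min_eq_right (by omega)
            have hb' : pvBuys c g (m + 1) = q := by
              simp only [pvBuys, if_neg h1, if_neg h2, ← hq]
              rw [hcast]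
              exact min_eq_right (by omega)
            rw [hb, hb', if_neg (by linarith)]

theorem BuyItem_py_spec : Claim_equal_BuyItem_py := by
  intro c g n _
  unfold Spec_BuyItem_py BuyItem_py BuyItem_py_alt
  have hfold :
      (PySem.List.pyRange 0 n 1).foldl
        (fun (st : Int × String × Int) target_list =>
          let st := if st.2.2 ≥ c then (st.1 + 1, st.2.1, st.2.2 - c) else st
          if target_list < 0 then (st.1, st.2.1 ++ "Количество не может быть меньше 1", st.2.2)
          else st)
        (0, "", g)
        = (pvBuys c g n.toNat, "", g - pvBuys c g n.toNat * c) := by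
    by_cases hn : n ≤ 0
    · rw [PySem.List.pyRange_one_eq_nil hn]
      simp [List.foldl_nil, pvBuys_zero, Int.toNat_of_nonpos hn]
    · have : n = (n.toNat : Int) := by omega
      rw [this]
      exact pvLoop c g n.toNat
  rw [hfold]
  have hbuys : pvBuys c g n.toNat =
      (if g < c then 0 else if c ≤ 0 then max n 0
       else min (max n 0) (PySem.Int.floordiv g c)) := by
    unfold pvBuys
    split_ifs with h1 h2
    · rfl
    · omega
    · rw [PySem.Int.floordiv_eq_ediv_of_pos (by omega)]
      congr 1
      omega
  simp only [hbuys]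
  split_ifs with h <;> simp
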